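-- pv_equiv track=rewrite | github.com/silver7i/CarpeDiem | kingshrimp/Feb/2_week/11th/swea-1220.py | make_matrix
-- ===== SOURCE A (Python) =====
-- red = 1
--
-- blue = 2
--
-- blank = 0
--
-- def make_matrix(N, matrix):
--     #  가독성을 위해 숫자들을 색으로 명칭
--     # TODO: 아 zip함수 오랜만에 써서 헷갈렸다.
--     #  *붙이고 리스트함수로 또 감싸기
--     # new_matrix = list(zip(*matrix))
--     # 튜플아 여기는 너가 있어야할 장소가 아니다
--     new_matrix = [list(row) for row in zip(*matrix)]
--
--     # 1. 메트릭스 양쪽 n,s 떨궈버리기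
--     for r in range(N):
--         for c in range(N):
--             if new_matrix[r][c] == red:
--                 break
--             elif new_matrix[r][c] == blue:
--                 new_matrix[r][c] = blank
--         for c in range(N-1, -1, -1):
--             if new_matrix[r][c] == blue:
--                 break
--             elif new_matrix[r][c] == red:
--                 new_matrix[r][c] = blank
--     return new_matrix
-- ===== SOURCE B (Python) =====
-- red = 1
-- blue = 2
-- blank = 0
--
-- def make_matrix(N, matrix):
--     out = [list(row) for row in zip(*matrix)]
--     for r in range(N):
--         row = out[r]
--         seg = row[:N]
--         # first red index in seg (len(seg) if none), last blue index in seg (-1 if none)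
--         fr = seg.index(red) if red in seg else len(seg)
--         lb = len(seg) - 1 - seg[::-1].index(blue) if blue in seg else -1
--         out[r] = [blank if (v == blue and c < fr) or (v == red and c > lb) else v
--                   for c, v in enumerate(seg)] + row[N:]
--     return out
-- ===== Notes on version B (the rewrite author's own statement) =====
-- stated objective: alternative
-- what changed: Replaces A's two break-driven directional mutating scans per transposed row by first computing two indices on the original row (first red index, last blue index) and then producing the cleaned row in one comprehension that blanks blues before the first red and reds after the last blue.
import Mathlib
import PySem

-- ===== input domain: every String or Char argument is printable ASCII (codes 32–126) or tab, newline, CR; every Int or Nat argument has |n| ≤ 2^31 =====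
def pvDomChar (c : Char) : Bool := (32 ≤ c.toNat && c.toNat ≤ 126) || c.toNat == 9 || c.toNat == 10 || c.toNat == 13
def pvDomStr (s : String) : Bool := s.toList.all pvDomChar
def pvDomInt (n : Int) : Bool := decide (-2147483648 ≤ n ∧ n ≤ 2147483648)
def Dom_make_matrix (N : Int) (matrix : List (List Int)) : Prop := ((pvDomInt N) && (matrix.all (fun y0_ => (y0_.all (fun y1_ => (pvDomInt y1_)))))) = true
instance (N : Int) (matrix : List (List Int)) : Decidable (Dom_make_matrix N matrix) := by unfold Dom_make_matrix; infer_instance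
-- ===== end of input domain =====

-- B cleans each transposed row via precomputed first-red / last-blue indices instead of A's
-- two break-driven mutating scans; same return value (objective: alternative decomposition).

-- ===== PORT A =====

-- [list(row) for row in zip(*matrix)] : zip truncates to the shortest row
def pyZipStar (m : List (List Int)) : List (List Int) :=
  (List.range ((m.map List.length).min?.getD 0)).map
    (fun i => m.map (fun row => row.getD i 0))

-- first inner loop: for c in range(N) scanning up, break on red (=1), blank blues (=2)
-- (the row index is in range on every input admitted by Pre_, so getD is exact there)
def fwdScan (row : List Int) (c N : Int) : List Int :=
  if h : c < N then
    if row.getD c.toNat 0 = 1 then row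
    else if row.getD c.toNat 0 = 2 then fwdScan (row.set c.toNat 0) (c + 1) N
    else fwdScan row (c + 1) N
  else row
termination_by (N - c).toNat
decreasing_by all_goals omega

-- second inner loop: for c in range(N-1, -1, -1), break on blue (=2), blank reds (=1)
def bwdScan (row : List Int) (c : Int) : List Int :=
  if h : 0 ≤ c then
    if row.getD c.toNat 0 = 2 then row
    else if row.getD c.toNat 0 = 1 then bwdScan (row.set c.toNat 0) (c - 1)
    else bwdScan row (c - 1)
  else row
termination_by (c + 1).toNat
decreasing_by all_goals omega

def make_matrix (N : Int) (matrix : List (List Int)) : List (List Int) :=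
  (PySem.List.pyRange 0 N 1).foldl
    (fun nm r =>
      nm.set r.toNat (bwdScan (fwdScan (nm.getD r.toNat []) 0 N) (N - 1)))
    (pyZipStar matrix)

-- ===== PORT B =====

-- body of B's loop: seg = row[:N]; fr = first red index (len(seg) if none);
-- lb = last blue index (-1 if none); blank blues before fr and reds after lb
def rowFixB (N : Int) (row : List Int) : List Int :=
  let seg := PySem.List.slice row none (some N)
  let fr : Int := match PySem.List.index? seg 1 with
    | some i => (i : Int)
    | none => (seg.length : Int)
  let lb : Int := match PySem.List.index? seg.reverse 2 with
    | some i => (seg.length : Int) - 1 - (i : Int)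
    | none => -1
  ((PySem.List.enumerate seg).map (fun cv =>
      if (cv.2 = 2 ∧ cv.1 < fr) ∨ (cv.2 = 1 ∧ cv.1 > lb) then 0 else cv.2))
  ++ PySem.List.slice row (some N) none

def make_matrix_alt (N : Int) (matrix : List (List Int)) : List (List Int) :=
  (PySem.List.pyRange 0 N 1).foldl
    (fun out r => out.set r.toNat (rowFixB N (out.getD r.toNat [])))
    (pyZipStar matrix)

-- ===== PRECONDITION & SPEC =====

-- exactly the inputs where Python A returns: for N > 0 it indexes the transpose at rows
-- 0..N-1 (needs a nonempty matrix with N ≤ every row length) and columns 0..N-1 (needs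
-- N ≤ number of rows); on anything else it raises IndexError
def Pre_make_matrix (N : Int) (matrix : List (List Int)) : Prop :=
  N ≤ 0 ∨ (matrix ≠ [] ∧ N ≤ (matrix.length : Int) ∧ ∀ row ∈ matrix, N ≤ (row.length : Int))
instance (N : Int) (matrix : List (List Int)) : Decidable (Pre_make_matrix N matrix) := by
  unfold Pre_make_matrix; infer_instance

def pvWitness_make_matrix : Int × List (List Int) := (2, [[1, 2], [0, 2]])

def Spec_make_matrix (N : Int) (matrix : List (List Int)) (out : List (List Int)) : Prop := out = make_matrix_alt N matrix
instance (N : Int) (matrix : List (List Int)) (out : List (List Int)) : Decidable (Spec_make_matrix N matrix out) := by unfold Spec_make_matrix; infer_instance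

-- ===== CLAIM (what is proved, stated in full; the proofs are below) =====
def Claim_equal_make_matrix : Prop := ∀ (N : Int) (matrix : List (List Int)), Dom_make_matrix N matrix → Pre_make_matrix N matrix → Spec_make_matrix N matrix (make_matrix N matrix)

-- ===== LEMMAS AND PROOFS =====

lemma getD_set (l : List Int) (i q : Nat) (a d : Int) :
    (l.set i a).getD q d = if q = i ∧ i < l.length then a else l.getD q d := by
  simp only [List.getD_eq_getElem?_getD, List.getElem?_set]
  split_ifs with h1 h2 h3 h4 <;> simp_all <;> omega

lemma getD_drop (l : List Int) (n m : Nat) (d : Int) :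
    (l.drop n).getD m d = l.getD (n + m) d := by
  simp [List.getD_eq_getElem?_getD, List.getElem?_drop]

lemma getD_take (l : List Int) (n q : Nat) (d : Int) (h : q < n) :
    (l.take n).getD q d = l.getD q d := by
  simp [List.getD_eq_getElem?_getD, List.getElem?_take, h]

lemma getD_lt_length {l : List Int} {q : Nat} {v : Int} (h : l.getD q 0 = v) (hv : v ≠ 0) :
    q < l.length := by
  by_contra hq
  rw [List.getD_eq_default _ _ (by omega)] at h
  exact hv h.symm

lemma fwd_spec (row : List Int) (c N : Int) : 0 ≤ c →
    ((fwdScan row c N).length = row.length ∧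
     ∀ p : Nat,
       (((c ≤ (p:Int) ∧ (p:Int) < N ∧ row.getD p 0 = 2 ∧
            ∀ q : Nat, c ≤ (q:Int) → q < p → row.getD q 0 ≠ 1) →
          (fwdScan row c N).getD p 0 = 0) ∧
        (¬(c ≤ (p:Int) ∧ (p:Int) < N ∧ row.getD p 0 = 2 ∧
            ∀ q : Nat, c ≤ (q:Int) → q < p → row.getD q 0 ≠ 1) →
          (fwdScan row c N).getD p 0 = row.getD p 0))) := by
  induction row, c using fwdScan.induct N with
  | case1 row c h hv =>
    intro hc
    have he : fwdScan row c N = row := by rw [fwdScan, dif_pos h, if_pos hv]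
    rw [he]
    refine ⟨rfl, fun p => ⟨?_, fun _ => rfl⟩⟩
    rintro ⟨h1, h2, h3, h4⟩
    have hpc : p ≠ c.toNat := by
      intro he'
      rw [he', hv] at h3
      exact absurd h3 (by norm_num)
    exact absurd hv (h4 c.toNat (by omega) (by omega))
  | case2 row c h hv1 hv2 ih =>
    intro hc
    obtain ⟨ihlen, ihp⟩ := ih (by omega)
    have hclen : c.toNat < row.length := getD_lt_length hv2 (by omega)
    have he : fwdScan row c N = fwdScan (row.set c.toNat 0) (c + 1) N := by
      rw [fwdScan, dif_pos h, if_neg hv1, if_pos hv2]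
    rw [he]
    refine ⟨by rw [ihlen, List.length_set], fun p => ⟨?_, ?_⟩⟩
    · rintro ⟨h1, h2, h3, h4⟩
      by_cases hpc : p = c.toNat
      · refine ((ihp p).2 ?_).trans ?_
        · rintro ⟨g1, _, _, _⟩; omega
        · rw [getD_set]; simp [hpc, hclen]
      · have hgt : c.toNat < p := by omega
        refine (ihp p).1 ⟨by omega, h2, ?_, ?_⟩
        · rw [getD_set, if_neg (by tauto)]; exact h3
        · intro q hq1 hq2
          rw [getD_set]
          by_cases hqc : q = c.toNat
          · simp [hqc, hclen]
          · rw [if_neg (by tauto)]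
            exact h4 q (by omega) hq2
    · intro hnc
      have step : (fwdScan (row.set c.toNat 0) (c + 1) N).getD p 0 = (row.set c.toNat 0).getD p 0 := by
        refine (ihp p).2 ?_
        rintro ⟨g1, g2, g3, g4⟩
        rw [getD_set] at g3
        by_cases hpc : p = c.toNat
        · omega
        · rw [if_neg (by tauto)] at g3
          refine hnc ⟨by omega, g2, g3, ?_⟩
          intro q hq1 hq2
          by_cases hqc : q = c.toNat
          · rw [hqc, hv2]; norm_num
          · have := g4 q (by omega) hq2
            rw [getD_set, if_neg (by tauto)] at this
            exact this
      rw [step, getD_set]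
      rw [if_neg ?_]
      rintro ⟨hpc, -⟩
      exact hnc ⟨by omega, by omega, by rw [hpc]; exact hv2, fun q hq1 hq2 => by omega⟩
  | case3 row c h hv1 hv2 ih =>
    intro hc
    obtain ⟨ihlen, ihp⟩ := ih (by omega)
    have he : fwdScan row c N = fwdScan row (c + 1) N := by
      rw [fwdScan, dif_pos h, if_neg hv1, if_neg hv2]
    rw [he]
    refine ⟨ihlen, fun p => ⟨?_, ?_⟩⟩
    · rintro ⟨h1, h2, h3, h4⟩
      have hpc : p ≠ c.toNat := by
        intro he'; rw [he'] at h3; exact hv2 h3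
      exact (ihp p).1 ⟨by omega, h2, h3, fun q hq1 hq2 => h4 q (by omega) hq2⟩
    · intro hnc
      refine (ihp p).2 ?_
      rintro ⟨g1, g2, g3, g4⟩
      refine hnc ⟨by omega, g2, g3, ?_⟩
      intro q hq1 hq2
      by_cases hqc : q = c.toNat
      · rw [hqc]; exact hv1
      · exact g4 q (by omega) hq2
  | case4 row c h =>
    intro hc
    have he : fwdScan row c N = row := by rw [fwdScan, dif_neg h]
    rw [he]
    refine ⟨rfl, fun p => ⟨?_, fun _ => rfl⟩⟩
    rintro ⟨h1, h2, -, -⟩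
    omega

lemma bwd_spec (row : List Int) (c : Int) :
    ((bwdScan row c).length = row.length ∧
     ∀ p : Nat,
       ((((p:Int) ≤ c ∧ row.getD p 0 = 1 ∧
            ∀ q : Nat, p < q → (q:Int) ≤ c → row.getD q 0 ≠ 2) →
          (bwdScan row c).getD p 0 = 0) ∧
        (¬((p:Int) ≤ c ∧ row.getD p 0 = 1 ∧
            ∀ q : Nat, p < q → (q:Int) ≤ c → row.getD q 0 ≠ 2) →
          (bwdScan row c).getD p 0 = row.getD p 0))) := by
  induction row, c using bwdScan.induct with
  | case1 row c h hv =>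
    have he : bwdScan row c = row := by rw [bwdScan, dif_pos h, if_pos hv]
    rw [he]
    refine ⟨rfl, fun p => ⟨?_, fun _ => rfl⟩⟩
    rintro ⟨h1, h2, h3⟩
    have hpc : p ≠ c.toNat := by
      intro he'
      rw [he', hv] at h2
      exact absurd h2 (by norm_num)
    exact absurd hv (h3 c.toNat (by omega) (by omega))
  | case2 row c h hv1 hv2 ih =>
    obtain ⟨ihlen, ihp⟩ := ih
    have hclen : c.toNat < row.length := getD_lt_length hv2 (by omega)
    have he : bwdScan row c = bwdScan (row.set c.toNat 0) (c - 1) := by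
      rw [bwdScan, dif_pos h, if_neg hv1, if_pos hv2]
    rw [he]
    refine ⟨by rw [ihlen, List.length_set], fun p => ⟨?_, ?_⟩⟩
    · rintro ⟨h1, h2, h3⟩
      by_cases hpc : p = c.toNat
      · refine ((ihp p).2 ?_).trans ?_
        · rintro ⟨g1, -, -⟩; omega
        · rw [getD_set]; simp [hpc, hclen]
      · have hlt : p < c.toNat := by omega
        refine (ihp p).1 ⟨by omega, ?_, ?_⟩
        · rw [getD_set, if_neg (by tauto)]; exact h2
        · intro q hq1 hq2
          rw [getD_set]
          by_cases hqc : q = c.toNat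
          · simp [hqc, hclen]
          · rw [if_neg (by tauto)]
            exact h3 q hq1 (by omega)
    · intro hnc
      have step : (bwdScan (row.set c.toNat 0) (c - 1)).getD p 0 = (row.set c.toNat 0).getD p 0 := by
        refine (ihp p).2 ?_
        rintro ⟨g1, g2, g3⟩
        rw [getD_set] at g2
        by_cases hpc : p = c.toNat
        · omega
        · rw [if_neg (by tauto)] at g2
          refine hnc ⟨by omega, g2, ?_⟩
          intro q hq1 hq2
          by_cases hqc : q = c.toNat
          · rw [hqc, hv2]; norm_num
          · have := g3 q hq1 (by omega)
            rw [getD_set, if_neg (by tauto)] at this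
            exact this
      by_cases hpc : p = c.toNat
      · exact absurd ⟨by omega, by rw [hpc]; exact hv2, fun q hq1 hq2 => by omega⟩ hnc
      · rw [step, getD_set, if_neg (by tauto)]
  | case3 row c h hv1 hv2 ih =>
    obtain ⟨ihlen, ihp⟩ := ih
    have he : bwdScan row c = bwdScan row (c - 1) := by
      rw [bwdScan, dif_pos h, if_neg hv1, if_neg hv2]
    rw [he]
    refine ⟨ihlen, fun p => ⟨?_, ?_⟩⟩
    · rintro ⟨h1, h2, h3⟩
      have hpc : p ≠ c.toNat := by
        intro he'; rw [he'] at h2; exact hv2 h2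
      exact (ihp p).1 ⟨by omega, h2, fun q hq1 hq2 => h3 q hq1 (by omega)⟩
    · intro hnc
      refine (ihp p).2 ?_
      rintro ⟨g1, g2, g3⟩
      refine hnc ⟨by omega, g2, ?_⟩
      intro q hq1 hq2
      by_cases hqc : q = c.toNat
      · rw [hqc]; exact hv1
      · exact g3 q hq1 (by omega)
  | case4 row c h =>
    have he : bwdScan row c = row := by rw [bwdScan, dif_neg h]
    rw [he]
    refine ⟨rfl, fun p => ⟨?_, fun _ => rfl⟩⟩
    rintro ⟨h1, -, -⟩
    omega

-- B's two indices, as named helpers for the proofs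
def frOf (seg : List Int) : Int :=
  match PySem.List.index? seg 1 with
  | some i => (i : Int)
  | none => (seg.length : Int)

def lbOf (seg : List Int) : Int :=
  match PySem.List.index? seg.reverse 2 with
  | some i => (seg.length : Int) - 1 - (i : Int)
  | none => -1

lemma frOf_spec (seg : List Int) :
    (0 ≤ frOf seg ∧ frOf seg ≤ (seg.length : Int)) ∧
    (∀ q : Nat, (q:Int) < frOf seg → seg.getD q 0 ≠ 1) ∧
    (frOf seg < (seg.length : Int) → seg.getD (frOf seg).toNat 0 = 1) := by
  rcases h : PySem.List.index? seg 1 with - | i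
  · have he : frOf seg = (seg.length : Int) := by unfold frOf; rw [h]
    have hmem : (1:Int) ∉ seg := (PySem.List.index?_eq_none_iff seg 1).1 h
    rw [he]
    refine ⟨⟨by omega, by omega⟩, ?_, by omega⟩
    intro q hq hv
    have hlen : q < seg.length := by omega
    rw [List.getD_eq_getElem _ _ hlen] at hv
    exact hmem (hv ▸ List.getElem_mem hlen)
  · have he : frOf seg = (i : Int) := by unfold frOf; rw [h]
    obtain ⟨hk, hv, hbefore⟩ := PySem.List.getElem_of_index?_eq_some h
    rw [he]
    refine ⟨⟨by omega, by omega⟩, ?_, ?_⟩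
    · intro q hq hvq
      have hql : q < i := by omega
      rw [List.getD_eq_getElem _ _ (by omega)] at hvq
      exact hbefore q hql hvq
    · intro _
      rw [Int.toNat_natCast, List.getD_eq_getElem _ _ hk]
      exact hv

lemma lbOf_spec (seg : List Int) :
    (-1 ≤ lbOf seg ∧ lbOf seg < (seg.length : Int)) ∧
    (∀ q : Nat, lbOf seg < (q:Int) → q < seg.length → seg.getD q 0 ≠ 2) ∧
    (0 ≤ lbOf seg → seg.getD (lbOf seg).toNat 0 = 2) := by
  rcases h : PySem.List.index? seg.reverse 2 with - | i
  · have he : lbOf seg = -1 := by unfold lbOf; rw [h]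
    have hmem : (2:Int) ∉ seg.reverse := (PySem.List.index?_eq_none_iff seg.reverse 2).1 h
    rw [List.mem_reverse] at hmem
    rw [he]
    refine ⟨⟨by omega, by omega⟩, ?_, by omega⟩
    intro q _ hlen hv
    rw [List.getD_eq_getElem _ _ hlen] at hv
    exact hmem (hv ▸ List.getElem_mem hlen)
  · have he : lbOf seg = (seg.length : Int) - 1 - (i : Int) := by unfold lbOf; rw [h]
    obtain ⟨hk0, hv0, hbefore0⟩ := PySem.List.getElem_of_index?_eq_some h
    have hk : i < seg.length := by simpa using hk0
    have hv' : seg.reverse.getD i 0 = 2 := by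
      rw [List.getD_eq_getElem _ _ hk0]; exact hv0
    have hbefore' : ∀ j : Nat, j < i → seg.reverse.getD j 0 ≠ 2 := by
      intro j hj
      rw [List.getD_eq_getElem _ _ (by simpa using (by omega : j < seg.length))]
      exact hbefore0 j hj
    have hrevD : ∀ j : Nat, j < seg.length →
        seg.reverse.getD j 0 = seg.getD (seg.length - 1 - j) 0 := by
      intro j hj
      rw [List.getD_eq_getElem _ _ (by simpa using hj),
          List.getD_eq_getElem _ _ (by omega : seg.length - 1 - j < seg.length)]
      rw [List.getElem_reverse]
    rw [he]
    refine ⟨⟨by omega, by omega⟩, ?_, ?_⟩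
    · intro q hq hlen hvq
      have hj : seg.length - 1 - q < i := by omega
      refine hbefore' (seg.length - 1 - q) hj ?_
      rw [hrevD _ (by omega)]
      have hqeq : seg.length - 1 - (seg.length - 1 - q) = q := by omega
      rw [hqeq]
      exact hvq
    · intro hge
      have hieq : ((seg.length : Int) - 1 - (i:Int)).toNat = seg.length - 1 - i := by omega
      rw [hieq, ← hrevD i hk]
      exact hv'

lemma rowFixB_def (N : Int) (row : List Int) (hN : 0 ≤ N) :
    rowFixB N row =
      ((PySem.List.enumerate (row.take N.toNat)).map (fun cv =>
          if (cv.2 = 2 ∧ cv.1 < frOf (row.take N.toNat)) ∨ (cv.2 = 1 ∧ cv.1 > lbOf (row.take N.toNat)) then 0 else cv.2))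
      ++ row.drop N.toNat := by
  simp only [rowFixB, frOf, lbOf, PySem.List.slice_to _ hN, PySem.List.slice_from _ hN]
  rfl

lemma rowFixB_getD (N : Int) (row : List Int) (hN : 0 ≤ N) (p : Nat)
    (hp : p < (row.take N.toNat).length) :
    (rowFixB N row).getD p 0 =
      (if ((row.take N.toNat).getD p 0 = 2 ∧ (p:Int) < frOf (row.take N.toNat)) ∨
          ((row.take N.toNat).getD p 0 = 1 ∧ (p:Int) > lbOf (row.take N.toNat)) then 0
       else (row.take N.toNat).getD p 0) := by
  rw [rowFixB_def _ _ hN]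
  rw [List.getD_append _ _ _ _ (by simp only [List.length_map, PySem.List.length_enumerate]; exact hp)]
  rw [List.getD_eq_getElem _ _ (by simp only [List.length_map, PySem.List.length_enumerate]; exact hp)]
  rw [List.getElem_map]
  simp only [PySem.List.getElem_enumerate, zero_add]
  rw [List.getD_eq_getElem _ _ hp]

lemma rowFixB_length (N : Int) (row : List Int) (hN : 0 ≤ N) :
    (rowFixB N row).length = row.length := by
  rw [rowFixB_def _ _ hN]
  simp [PySem.List.length_enumerate]
  omega

lemma rowFix_getD (N : Int) (hN : 1 ≤ N) (row : List Int) (p : Nat) :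
    (bwdScan (fwdScan row 0 N) (N - 1)).getD p 0 = (rowFixB N row).getD p 0 := by
  obtain ⟨hFlen, hF⟩ := fwd_spec row 0 N (by omega)
  obtain ⟨hBlen, hB⟩ := bwd_spec (fwdScan row 0 N) (N - 1)
  obtain ⟨⟨hfr0, hfr1⟩, hfrno, hfrval⟩ := frOf_spec (row.take N.toNat)
  obtain ⟨⟨hlb0, hlb1⟩, hlbno, hlbval⟩ := lbOf_spec (row.take N.toNat)
  have hsl : (row.take N.toNat).length = min N.toNat row.length := List.length_take
  have hseg_getD : ∀ q : Nat, q < (row.take N.toNat).length →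
      (row.take N.toNat).getD q 0 = row.getD q 0 := by
    intro q hq
    exact getD_take _ _ _ _ (by omega)
  -- value of the forward pass at every position inside seg
  have hFval : ∀ q : Nat, q < (row.take N.toNat).length →
      (fwdScan row 0 N).getD q 0 =
        (if row.getD q 0 = 2 ∧ (q:Int) < frOf (row.take N.toNat) then 0 else row.getD q 0) := by
    intro q hq
    by_cases hcase : row.getD q 0 = 2 ∧ (q:Int) < frOf (row.take N.toNat)
    · rw [if_pos hcase]
      refine (hF q).1 ⟨by omega, by omega, hcase.1, ?_⟩
      intro j _ hj
      have hjl : j < (row.take N.toNat).length := by omega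
      rw [← hseg_getD j hjl]
      exact hfrno j (by omega)
    · rw [if_neg hcase]
      refine (hF q).2 ?_
      rintro ⟨-, -, h3, h4⟩
      refine hcase ⟨h3, ?_⟩
      by_contra hge
      have hfrlt : frOf (row.take N.toNat) < ((row.take N.toNat).length : Int) := by omega
      have hred := hfrval hfrlt
      rw [hseg_getD _ (by omega)] at hred
      rcases eq_or_ne (frOf (row.take N.toNat)).toNat q with heq | hne
      · rw [heq, h3] at hred
        exact absurd hred (by norm_num)
      · exact (h4 (frOf (row.take N.toNat)).toNat (by omega) (by omega)) hred
  by_cases hplen : p < row.length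
  · by_cases hpm : p < (row.take N.toNat).length
    · -- inside the cleaned segment
      rw [rowFixB_getD _ _ (by omega) _ hpm]
      have hrowq := hseg_getD p hpm
      by_cases hv2 : row.getD p 0 = 2
      · -- blue cell: backward pass leaves it (its value is 0 or 2, never 1)
        have hFp := hFval p hpm
        have hFne1 : (fwdScan row 0 N).getD p 0 ≠ 1 := by
          rw [hFp]
          split_ifs with h'
          · norm_num
          · rw [hv2]; norm_num
        rw [(hB p).2 (by rintro ⟨-, g2, -⟩; exact hFne1 g2)]
        rw [hFp, hrowq, hv2]
        by_cases hfr : (p:Int) < frOf (row.take N.toNat)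
        · rw [if_pos ⟨rfl, hfr⟩, if_pos (Or.inl ⟨rfl, hfr⟩)]
        · rw [if_neg (by rintro ⟨-, g⟩; exact hfr g),
              if_neg (by rintro (⟨-, g⟩ | ⟨g, -⟩); exacts [hfr g, absurd g (by norm_num)])]
      · by_cases hv1 : row.getD p 0 = 1
        · -- red cell: kept by forward pass; blanked iff no blue after it in seg
          have hFp : (fwdScan row 0 N).getD p 0 = row.getD p 0 := by
            rw [hFval p hpm, if_neg (by rintro ⟨g, -⟩; exact hv2 g)]
          have hQiff : (∀ q : Nat, p < q → (q:Int) ≤ N - 1 → (fwdScan row 0 N).getD q 0 ≠ 2)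
              ↔ (p:Int) > lbOf (row.take N.toNat) := by
            constructor
            · intro hQ
              by_contra hle
              have hlbn : 0 ≤ lbOf (row.take N.toNat) := by omega
              have hlbv := hlbval hlbn
              have hlbm : (lbOf (row.take N.toNat)).toNat < (row.take N.toNat).length := by omega
              have hne : (lbOf (row.take N.toNat)).toNat ≠ p := by
                intro heq
                rw [heq, hseg_getD p hpm, hv1] at hlbv
                exact absurd hlbv (by norm_num)
              refine hQ (lbOf (row.take N.toNat)).toNat (by omega) (by omega) ?_
              rw [hFval _ hlbm]
              have hb2 : row.getD (lbOf (row.take N.toNat)).toNat 0 = 2 := by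
                rw [← hseg_getD _ hlbm]; exact hlbv
              rw [if_neg ?_, hb2]
              rintro ⟨-, hlt⟩
              -- the red at p forces frOf ≤ p, so no blue beyond p can be below frOf
              have hfp : frOf (row.take N.toNat) ≤ (p:Int) := by
                by_contra hfp
                exact hfrno p (by omega) (by rw [hseg_getD p hpm]; exact hv1)
              omega
            · intro hgt q hq1 hq2
              by_cases hqm : q < (row.take N.toNat).length
              · rw [hFval q hqm]
                split_ifs with h'
                · norm_num
                · intro hq2'
                  exact (hlbno q (by omega) hqm) (by rw [hseg_getD q hqm]; exact hq2')
              · rw [List.getD_eq_default _ _ (by rw [hFlen]; omega)]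
                norm_num
          by_cases hQ : (p:Int) > lbOf (row.take N.toNat)
          · rw [(hB p).1 ⟨by omega, by rw [hFp]; exact hv1, hQiff.2 hQ⟩]
            rw [hrowq, hv1]
            rw [if_pos (Or.inr ⟨rfl, hQ⟩)]
          · rw [(hB p).2 (by rintro ⟨-, -, g3⟩; exact hQ (hQiff.1 g3))]
            rw [hFp, hrowq, hv1]
            rw [if_neg (by rintro (⟨g, -⟩ | ⟨-, g⟩); exacts [absurd g (by norm_num), hQ g])]
        · -- neither colour: untouched on both sides
          have hFp : (fwdScan row 0 N).getD p 0 = row.getD p 0 := by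
            rw [hFval p hpm, if_neg (by rintro ⟨g, -⟩; exact hv2 g)]
          rw [(hB p).2 (by rintro ⟨-, g2, -⟩; rw [hFp] at g2; exact hv1 g2)]
          rw [hFp, hrowq]
          rw [if_neg (by rintro (⟨g, -⟩ | ⟨g, -⟩); exacts [hv2 g, hv1 g])]
    · -- tail beyond N: untouched on both sides
      have hpN : N ≤ (p:Int) := by omega
      have hFp : (fwdScan row 0 N).getD p 0 = row.getD p 0 := by
        refine (hF p).2 ?_
        rintro ⟨-, g2, -, -⟩
        omega
      rw [(hB p).2 (by rintro ⟨g1, -, -⟩; omega)]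
      rw [hFp]
      rw [rowFixB_def _ _ (by omega)]
      rw [List.getD_append_right _ _ _ _ (by simp [PySem.List.length_enumerate]; omega)]
      simp only [List.length_map, PySem.List.length_enumerate]
      rw [getD_drop]
      have hidx : N.toNat + (p - (row.take N.toNat).length) = p := by omega
      rw [hidx]
  · -- beyond the row: both defaults
    rw [List.getD_eq_default _ _ (by rw [hBlen, hFlen]; omega)]
    rw [List.getD_eq_default _ _ (by rw [rowFixB_length _ _ (by omega)]; omega)]

lemma rowFix_eq (N : Int) (hN : 1 ≤ N) (row : List Int) :
    bwdScan (fwdScan row 0 N) (N - 1) = rowFixB N row := by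
  obtain ⟨hFlen, -⟩ := fwd_spec row 0 N (by omega)
  obtain ⟨hBlen, -⟩ := bwd_spec (fwdScan row 0 N) (N - 1)
  apply List.ext_getElem (by rw [hBlen, hFlen, rowFixB_length _ _ (by omega)])
  intro p hp1 hp2
  rw [← List.getD_eq_getElem _ 0 hp1, ← List.getD_eq_getElem _ 0 hp2]
  exact rowFix_getD N hN row p

-- ===== VERDICT (by name: the statement is the Claim_ definition above) =====
theorem make_matrix_spec : Claim_equal_make_matrix := by
  intro N matrix _ _
  unfold Spec_make_matrix make_matrix make_matrix_alt
  by_cases hN : N ≤ 0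
  · rw [PySem.List.pyRange_one_eq_nil hN]
    rfl
  · have hstep : (fun (nm : List (List Int)) (r : Int) =>
        nm.set r.toNat (bwdScan (fwdScan (nm.getD r.toNat []) 0 N) (N - 1)))
      = (fun (out : List (List Int)) (r : Int) => out.set r.toNat (rowFixB N (out.getD r.toNat []))) := by
      funext nm r
      rw [rowFix_eq N (by omega)]
    rw [hstep]
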